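-- pv_equiv track=rewrite | github.com/ee451-superweb/SuperWeb-Cluster | compute_node/input_matrix/generator.py | _build_chunk_plan
-- ===== SOURCE A (Python) =====
-- def _build_chunk_plan(total_values: int, chunk_values: int) -> list[tuple[int, int, int]]:
--     """Return `(offset_bytes, value_count, start_index)` for each file chunk."""
--
--     plan: list[tuple[int, int, int]] = []
--     written_values = 0
--     while written_values < total_values:
--         current_chunk_values = min(chunk_values, total_values - written_values)
--         plan.append((written_values * 4, current_chunk_values, written_values))
--         written_values += current_chunk_values
--     return plan
-- ===== SOURCE B (Python) =====
-- def _build_chunk_plan(total_values: int, chunk_values: int) -> list[tuple[int, int, int]]: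
--     """Return `(offset_bytes, value_count, start_index)` for each file chunk."""
--     if total_values <= 0:
--         return []
--     num_full, remainder = divmod(total_values, chunk_values)
--     plan = [(i * chunk_values * 4, chunk_values, i * chunk_values) for i in range(num_full)]
--     if remainder:
--         plan.append((num_full * chunk_values * 4, remainder, num_full * chunk_values))
--     return plan
-- ===== Notes on version B (the rewrite author's own statement) =====
-- stated objective: simpler
-- what changed: Replaced the accumulator-driven while/min loop with a count-then-index decomposition: divmod gives the number of full chunks and the remainder, full chunks come from a range comprehension and an optional remainder tuple is appended.
import Mathlib
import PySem

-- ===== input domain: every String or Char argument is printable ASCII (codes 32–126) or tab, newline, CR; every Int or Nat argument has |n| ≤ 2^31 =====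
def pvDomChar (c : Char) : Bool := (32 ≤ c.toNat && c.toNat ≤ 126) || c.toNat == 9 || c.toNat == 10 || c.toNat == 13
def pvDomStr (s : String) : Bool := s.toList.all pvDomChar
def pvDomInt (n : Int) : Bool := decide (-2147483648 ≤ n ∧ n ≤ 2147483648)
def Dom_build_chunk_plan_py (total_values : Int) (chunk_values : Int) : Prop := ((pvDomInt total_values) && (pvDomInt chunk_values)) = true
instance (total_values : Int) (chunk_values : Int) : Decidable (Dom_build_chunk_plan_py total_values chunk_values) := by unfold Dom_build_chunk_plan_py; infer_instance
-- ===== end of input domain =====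

-- B replaces A's accumulator-driven while/min loop by a divmod count-then-index decomposition (objective: simpler).

-- ===== PORT A =====
-- The while loop is ported with fuel: when 0 < chunk_values each iteration advances
-- written_values by at least 1, so total_values.toNat + 1 fuel is never exhausted on
-- inputs inside Pre_; outside Pre_ the Python loop diverges and nothing is claimed.
def buildLoopA (fuel : Nat) (total_values chunk_values written_values : Int)
    (plan : List (Int × Int × Int)) : List (Int × Int × Int) :=
  match fuel with
  | 0 => plan
  | f + 1 =>
    if written_values < total_values then
      let current_chunk_values := min chunk_values (total_values - written_values)
      buildLoopA f total_values chunk_values (written_values + current_chunk_values)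
        (plan ++ [(written_values * 4, current_chunk_values, written_values)])
    else plan

def build_chunk_plan_py (total_values : Int) (chunk_values : Int) : List (Int × Int × Int) :=
  buildLoopA (total_values.toNat + 1) total_values chunk_values 0 []

-- ===== PORT B =====
def build_chunk_plan_py_alt (total_values : Int) (chunk_values : Int) : List (Int × Int × Int) :=
  if total_values ≤ 0 then []
  else
    let num_full := PySem.Int.floordiv total_values chunk_values
    let remainder := PySem.Int.mod total_values chunk_values
    let plan := (PySem.List.pyRange 0 num_full 1).map
      (fun i => (i * chunk_values * 4, chunk_values, i * chunk_values))
    if remainder ≠ 0 then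
      plan ++ [(num_full * chunk_values * 4, remainder, num_full * chunk_values)]
    else plan

-- ===== PRECONDITION & SPEC =====
-- Pre_ excludes total_values > 0 with chunk_values ≤ 0: there A's while loop never
-- terminates (written_values never increases), i.e. A returns nothing.
def Pre_build_chunk_plan_py (total_values : Int) (chunk_values : Int) : Prop :=
  total_values ≤ 0 ∨ 0 < chunk_values
instance (total_values : Int) (chunk_values : Int) : Decidable (Pre_build_chunk_plan_py total_values chunk_values) := by unfold Pre_build_chunk_plan_py; infer_instance
def pvWitness_build_chunk_plan_py : Int × Int := (10, 4)

def Spec_build_chunk_plan_py (total_values : Int) (chunk_values : Int) (out : List (Int × Int × Int)) : Prop := out = build_chunk_plan_py_alt total_values chunk_values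
instance (total_values : Int) (chunk_values : Int) (out : List (Int × Int × Int)) : Decidable (Spec_build_chunk_plan_py total_values chunk_values out) := by unfold Spec_build_chunk_plan_py; infer_instance

-- ===== CLAIM (what is proved, stated in full; the proofs are below) =====
def Claim_equal_build_chunk_plan_py : Prop := ∀ (total_values : Int) (chunk_values : Int), Dom_build_chunk_plan_py total_values chunk_values → Pre_build_chunk_plan_py total_values chunk_values → Spec_build_chunk_plan_py total_values chunk_values (build_chunk_plan_py total_values chunk_values)

-- ===== LEMMAS AND PROOFS =====

-- Loop invariant: starting at written_values = i * chunk with 0 ≤ i ≤ num_full and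
-- enough fuel, the loop appends exactly B's entries for indices i, i+1, …
theorem buildLoopA_eq (total chunk : Int) (hc : 0 < chunk) (_ht : 0 < total) :
    ∀ (fuel : Nat) (i : Int) (plan : List (Int × Int × Int)),
      0 ≤ i → i ≤ PySem.Int.floordiv total chunk →
      (total - i * chunk).toNat ≤ fuel →
      buildLoopA fuel total chunk (i * chunk) plan =
        plan ++ ((PySem.List.pyRange i (PySem.Int.floordiv total chunk) 1).map
          (fun j => (j * chunk * 4, chunk, j * chunk)) ++
          (if PySem.Int.mod total chunk ≠ 0 then
            [(PySem.Int.floordiv total chunk * chunk * 4, PySem.Int.mod total chunk,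
              PySem.Int.floordiv total chunk * chunk)]
          else [])) := by
  have hdm := PySem.Int.floordiv_mul_add_mod total chunk
  have hr0 := PySem.Int.mod_nonneg total hc
  have hrlt := PySem.Int.mod_lt total hc
  set q := PySem.Int.floordiv total chunk with hq
  set r := PySem.Int.mod total chunk with hrm
  intro fuel
  induction fuel with
  | zero =>
    intro i plan hi0 hiq hfuel
    -- fuel 0 forces total ≤ i*chunk, hence i = q and r = 0
    have hle : total ≤ i * chunk := by omega
    have hiq' : i = q := by nlinarith
    have hr : r = 0 := by nlinarith
    simp [buildLoopA, hiq', hr, PySem.List.pyRange_one_eq_nil (le_refl q)]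
  | succ f ih =>
    intro i plan hi0 hiq hfuel
    by_cases hlt : i * chunk < total
    · by_cases hfull : (i + 1) * chunk ≤ total
      · -- full chunk: i < q, min = chunk
        have hiltq : i < q := by nlinarith
        have hcons : PySem.List.pyRange i q 1 = i :: PySem.List.pyRange (i+1) q 1 :=
          PySem.List.pyRange_one_cons hiltq
        have hmin : min chunk (total - i * chunk) = chunk := by
          apply min_eq_left; nlinarith
        have hrec := ih (i + 1) (plan ++ [(i * chunk * 4, chunk, i * chunk)])
          (by omega) (by omega)
          (by
            have h1 : (i+1) * chunk = i * chunk + chunk := by ring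
            omega)
        simp only [buildLoopA, if_pos hlt, hmin]
        have harg : i * chunk + chunk = (i + 1) * chunk := by ring
        rw [harg, hrec, hcons]
        simp [List.append_assoc]
      · -- last, partial chunk: i = q, min = r > 0
        have hiq' : i = q := by
          by_contra h
          have h1 : i + 1 ≤ q := by omega
          nlinarith
        subst hiq'
        have htr : total - q * chunk = r := by omega
        have hrpos : 0 < r := by omega
        have hmin : min chunk (total - q * chunk) = r := by
          rw [htr]; exact min_eq_right hrlt.le
        simp only [buildLoopA, if_pos hlt, hmin]
        have hstop : ¬ (q * chunk + r < total) := by omega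
        have hdone : buildLoopA f total chunk (q * chunk + r)
            (plan ++ [(q * chunk * 4, r, q * chunk)]) =
            plan ++ [(q * chunk * 4, r, q * chunk)] := by
          cases f <;> simp [buildLoopA, hstop]
        rw [hdone]
        simp [PySem.List.pyRange_one_eq_nil (le_refl q), hrpos.ne']
    · -- loop does not run: i = q, r = 0
      have hle : total ≤ i * chunk := by omega
      have hiq' : i = q := by nlinarith
      have hr : r = 0 := by nlinarith
      simp only [buildLoopA, if_neg hlt]
      simp [hiq', hr, PySem.List.pyRange_one_eq_nil (le_refl q)]

-- ===== VERDICT (by name: the statement is the Claim_ definition above) =====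
theorem build_chunk_plan_py_spec : Claim_equal_build_chunk_plan_py := by
  intro total chunk _ hpre
  unfold Spec_build_chunk_plan_py build_chunk_plan_py build_chunk_plan_py_alt
  by_cases ht : total ≤ 0
  · have : ¬ ((0:Int) < total) := by omega
    simp [buildLoopA, this, ht]
  · have ht' : 0 < total := by omega
    have hc : 0 < chunk := by
      rcases hpre with h | h
      · omega
      · exact h
    have := buildLoopA_eq total chunk hc ht' (total.toNat + 1) 0 []
      (le_refl 0) (by
        have := PySem.Int.floordiv_mul_add_mod total chunk
        have hr0 := PySem.Int.mod_nonneg total hc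
        have hrlt := PySem.Int.mod_lt total hc
        nlinarith)
      (by omega)
    simp only [zero_mul] at this
    rw [this]
    simp only [List.nil_append]
    split_ifs with h <;> simp
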